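-- pv_equiv track=rewrite | github.com/MrBrantCode/unitest_baseline | mut_generate/mist_train_taco/taco_3209/solution.py | count_quadruples
-- ===== SOURCE A (Python) =====
-- def count_quadruples(N: int, K: int) -> int:
--     """
--     Counts the number of quadruples (a, b, c, d) that satisfy the conditions:
--     - 1 <= a, b, c, d <= N
--     - a + b - c - d = K
--
--     Parameters:
--     - N (int): The upper limit for a, b, c, and d.
--     - K (int): The target difference.
--
--     Returns:
--     - int: The number of valid quadruples.
--     """
--
--     def num_pair(m):
--         if m <= N:
--             return m - 1
--         return 2 * N - m + 1
--
--     K = abs(K)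
--     ans = 0
--     for i in range(K + 2, 2 * N + 1):
--         ans += num_pair(i) * num_pair(i - K)
--
--     return ans
-- ===== SOURCE B (Python) =====
-- def count_quadruples(N: int, K: int) -> int:
--     """O(1) closed form: split the sum over pair-sums into three linear
--     segments and evaluate each with polynomial sum formulas."""
--     K = abs(K)
--
--     def seg(lo, hi, p2, p1, p0):
--         # sum of p2*i^2 + p1*i + p0 for i in [lo, hi] (0 if empty)
--         if lo > hi:
--             return 0
--         n = hi - lo + 1
--         s1 = (lo + hi) * n // 2
--         s2 = (hi * (hi + 1) * (2 * hi + 1) - (lo - 1) * lo * (2 * lo - 1)) // 6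
--         return p2 * s2 + p1 * s1 + p0 * n
--
--     lo, hi = K + 2, 2 * N
--     a1 = seg(lo, min(hi, N), 1, -(K + 2), K + 1)
--     a2 = seg(max(lo, N + 1), min(hi, N + K), -1, 2 * N + K + 2, -(2 * N + 1) * (K + 1))
--     a3 = seg(max(lo, N + K + 1), hi, 1, -(4 * N + K + 2), (2 * N + 1) * (2 * N + K + 1))
--     return a1 + a2 + a3
-- ===== Notes on version B (the rewrite author's own statement) =====
-- stated objective: faster
-- what changed: Replaced the O(N) loop over all pair-sums by an O(1) closed form: the summand is a piecewise quadratic, so the sum is split into three segments and each is evaluated with polynomial sum formulas.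
import Mathlib
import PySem

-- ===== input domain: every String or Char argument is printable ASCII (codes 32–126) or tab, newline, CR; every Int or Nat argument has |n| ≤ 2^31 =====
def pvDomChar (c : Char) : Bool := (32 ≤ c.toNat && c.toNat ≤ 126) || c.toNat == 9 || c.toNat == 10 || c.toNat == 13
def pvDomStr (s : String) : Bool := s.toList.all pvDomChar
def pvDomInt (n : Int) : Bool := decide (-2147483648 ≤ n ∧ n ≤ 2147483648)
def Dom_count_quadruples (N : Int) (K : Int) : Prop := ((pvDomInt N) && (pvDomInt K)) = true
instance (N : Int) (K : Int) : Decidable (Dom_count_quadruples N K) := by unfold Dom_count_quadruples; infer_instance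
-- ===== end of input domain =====

-- B replaces A's O(N) loop over pair-sums by an O(1) three-segment closed form (faster, asymptotic).

-- ===== PORT A =====
def numPair (N m : Int) : Int := if m ≤ N then m - 1 else 2 * N - m + 1

def count_quadruples (N : Int) (K : Int) : Int :=
  let K' := |K|
  (PySem.List.pyRange (K' + 2) (2 * N + 1) 1).foldl
    (fun ans i => ans + numPair N i * numPair N (i - K')) 0

-- ===== PORT B =====
-- sum of p2*i^2 + p1*i + p0 for i in [lo, hi] via closed formulas (0 if empty)
def segSum (lo hi p2 p1 p0 : Int) : Int :=
  if lo > hi then 0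
  else
    let n := hi - lo + 1
    let s1 := PySem.Int.floordiv ((lo + hi) * n) 2
    let s2 := PySem.Int.floordiv (hi * (hi + 1) * (2 * hi + 1) - (lo - 1) * lo * (2 * lo - 1)) 6
    p2 * s2 + p1 * s1 + p0 * n

def count_quadruples_alt (N : Int) (K : Int) : Int :=
  let K' := |K|
  let lo := K' + 2
  let hi := 2 * N
  let a1 := segSum lo (min hi N) 1 (-(K' + 2)) (K' + 1)
  let a2 := segSum (max lo (N + 1)) (min hi (N + K')) (-1) (2 * N + K' + 2) (-((2 * N + 1) * (K' + 1)))
  let a3 := segSum (max lo (N + K' + 1)) hi 1 (-(4 * N + K' + 2)) ((2 * N + 1) * (2 * N + K' + 1))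
  a1 + a2 + a3

-- ===== PRECONDITION & SPEC =====
def Spec_count_quadruples (N : Int) (K : Int) (out : Int) : Prop := out = count_quadruples_alt N K
instance (N : Int) (K : Int) (out : Int) : Decidable (Spec_count_quadruples N K out) := by unfold Spec_count_quadruples; infer_instance

-- ===== CLAIM (what is proved, stated in full; the proofs are below) =====
def Claim_equal_count_quadruples : Prop := ∀ (N : Int) (K : Int), Dom_count_quadruples N K → Spec_count_quadruples N K (count_quadruples N K)

-- ===== LEMMAS AND PROOFS =====

-- sum of g over the integer interval [lo, hi]
def SInt (lo hi : Int) (g : Int → Int) : Int :=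
  ((List.range (hi + 1 - lo).toNat).map (fun k : Nat => g (lo + (k : Int)))).sum

theorem SInt_zero (lo hi : Int) (g : Int → Int) (h : hi < lo) : SInt lo hi g = 0 := by
  unfold SInt
  have : (hi + 1 - lo).toNat = 0 := by omega
  simp [this]

theorem SInt_congr (lo hi : Int) (g h : Int → Int)
    (hgh : ∀ i, lo ≤ i → i ≤ hi → g i = h i) : SInt lo hi g = SInt lo hi h := by
  unfold SInt
  refine congrArg List.sum (List.map_congr_left ?_)
  intro k hk
  rw [List.mem_range] at hk
  exact hgh _ (by omega) (by omega)

theorem SInt_split (lo m hi : Int) (g : Int → Int) (h1 : lo - 1 ≤ m) (h2 : m ≤ hi) :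
    SInt lo hi g = SInt lo m g + SInt (m + 1) hi g := by
  unfold SInt
  have hlen : (hi + 1 - lo).toNat = (m + 1 - lo).toNat + (hi - m).toNat := by omega
  rw [hlen, List.range_add, List.map_append, List.sum_append]
  congr 1
  rw [List.map_map]
  have hq : hi + 1 - (m + 1) = hi - m := by omega
  rw [hq]
  refine congrArg List.sum (List.map_congr_left ?_)
  intro k hk
  rw [List.mem_range] at hk
  show g _ = g _
  congr 1
  push_cast
  omega

theorem sum_lin (n : Nat) (a : Int) :
    ((List.range n).map (fun k : Nat => a + (k : Int))).sum * 2 = (2 * a + n - 1) * n := by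
  induction n with
  | zero => simp
  | succ n ih =>
    rw [List.range_succ, List.map_append, List.sum_append]
    push_cast
    simp only [List.map_cons, List.map_nil, List.sum_cons, List.sum_nil]
    nlinarith [ih]

theorem sum_sq (n : Nat) (a : Int) :
    ((List.range n).map (fun k : Nat => (a + (k : Int)) ^ 2)).sum * 6 =
      (a + n - 1) * (a + n) * (2 * (a + n) - 1) - (a - 1) * a * (2 * a - 1) := by
  induction n with
  | zero => simp
  | succ n ih =>
    rw [List.range_succ, List.map_append, List.sum_append]
    push_cast
    simp only [List.map_cons, List.map_nil, List.sum_cons, List.sum_nil]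
    nlinarith [ih]

theorem sum_poly (n : Nat) (a p2 p1 p0 : Int) :
    ((List.range n).map (fun k : Nat => p2 * (a + (k : Int)) ^ 2 + p1 * (a + (k : Int)) + p0)).sum =
      p2 * ((List.range n).map (fun k : Nat => (a + (k : Int)) ^ 2)).sum +
        p1 * ((List.range n).map (fun k : Nat => a + (k : Int))).sum + p0 * n := by
  induction n with
  | zero => simp
  | succ n ih =>
    rw [List.range_succ]
    simp only [List.map_append, List.sum_append, List.map_cons, List.map_nil, List.sum_cons,
      List.sum_nil]
    push_cast
    rw [ih]
    ring

theorem segSum_eq (lo hi p2 p1 p0 : Int) :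
    segSum lo hi p2 p1 p0 = SInt lo hi (fun i => p2 * i ^ 2 + p1 * i + p0) := by
  unfold segSum
  by_cases h : lo > hi
  · rw [if_pos h, SInt_zero _ _ _ h]
  · rw [if_neg h]
    have hle : lo ≤ hi := by omega
    set n : Nat := (hi + 1 - lo).toNat with hn
    have hcast : (n : Int) = hi - lo + 1 := by omega
    have h1 : (lo + hi) * (hi - lo + 1) =
        ((List.range n).map (fun k : Nat => lo + (k : Int))).sum * 2 := by
      rw [sum_lin n lo]; rw [hcast]; ring
    have h2 : hi * (hi + 1) * (2 * hi + 1) - (lo - 1) * lo * (2 * lo - 1) =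
        ((List.range n).map (fun k : Nat => (lo + (k : Int)) ^ 2)).sum * 6 := by
      rw [sum_sq n lo]
      have : lo + (n : Int) = hi + 1 := by omega
      rw [this]; ring
    have e1 : PySem.Int.floordiv ((lo + hi) * (hi - lo + 1)) 2 =
        ((List.range n).map (fun k : Nat => lo + (k : Int))).sum := by
      rw [h1, PySem.Int.floordiv_eq_ediv_of_pos (by norm_num), mul_comm,
        Int.mul_ediv_cancel_left _ (by norm_num)]
    have e2 : PySem.Int.floordiv (hi * (hi + 1) * (2 * hi + 1) - (lo - 1) * lo * (2 * lo - 1)) 6 =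
        ((List.range n).map (fun k : Nat => (lo + (k : Int)) ^ 2)).sum := by
      rw [h2, PySem.Int.floordiv_eq_ediv_of_pos (by norm_num), mul_comm,
        Int.mul_ediv_cancel_left _ (by norm_num)]
    show p2 * _ + p1 * _ + p0 * (hi - lo + 1) = _
    rw [e1, e2]
    unfold SInt
    rw [← hn, sum_poly n lo p2 p1 p0, hcast]

theorem A_as_SInt (N K : Int) :
    count_quadruples N K =
      SInt (|K| + 2) (2 * N) (fun i => numPair N i * numPair N (i - |K|)) := by
  show (PySem.List.pyRange (|K| + 2) (2 * N + 1) 1).foldl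
      (fun ans i => ans + numPair N i * numPair N (i - |K|)) 0 = _
  rw [PySem.List.pyRange_one, PySem.List.foldl_add, zero_add]
  unfold SInt
  rw [List.map_map]
  rfl

theorem count_quadruples_eq (N K : Int) : count_quadruples N K = count_quadruples_alt N K := by
  rw [A_as_SInt]
  unfold count_quadruples_alt
  simp only []
  rw [segSum_eq, segSum_eq, segSum_eq]
  set K' := |K| with hK'
  have hK0 : 0 ≤ K' := abs_nonneg K
  set lo := K' + 2 with hlo
  set hi := 2 * N with hhi
  by_cases hE : hi < lo
  · rw [SInt_zero _ _ _ hE, SInt_zero, SInt_zero, SInt_zero] <;> omega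
  · -- lo ≤ hi, hence 0 ≤ K' ≤ 2N - 2 and N ≥ 1
    have hN1 : 1 ≤ N := by omega
    have hg1 : ∀ i, lo ≤ i → i ≤ N →
        numPair N i * numPair N (i - K') = 1 * i ^ 2 + (-(K' + 2)) * i + (K' + 1) := by
      intro i h1 h2
      unfold numPair
      rw [if_pos h2, if_pos (by omega)]
      ring
    have hg2 : ∀ i, lo ≤ i → N + 1 ≤ i → i - K' ≤ N →
        numPair N i * numPair N (i - K') =
          (-1) * i ^ 2 + (2 * N + K' + 2) * i + (-((2 * N + 1) * (K' + 1))) := by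
      intro i h1 h2 h3
      unfold numPair
      rw [if_neg (by omega), if_pos (by omega)]
      ring
    have hg3 : ∀ i, N + K' + 1 ≤ i →
        numPair N i * numPair N (i - K') =
          1 * i ^ 2 + (-(4 * N + K' + 2)) * i + (2 * N + 1) * (2 * N + K' + 1) := by
      intro i h1
      unfold numPair
      rw [if_neg (by omega), if_neg (by omega)]
      ring
    by_cases ha : K' ≤ N - 2
    · -- three real segments
      have e1 : min hi N = N := by omega
      have e2 : max lo (N + 1) = N + 1 := by omega
      have e3 : min hi (N + K') = N + K' := by omega
      have e4 : max lo (N + K' + 1) = N + K' + 1 := by omega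
      rw [e1, e2, e3, e4]
      rw [SInt_split lo N hi _ (by omega) (by omega),
        SInt_split (N + 1) (N + K') hi _ (by omega) (by omega)]
      rw [SInt_congr lo N _ _ (fun i h1 h2 => hg1 i h1 h2),
        SInt_congr (N + 1) (N + K') _ _ (fun i h1 h2 => hg2 i (by omega) h1 (by omega)),
        SInt_congr (N + K' + 1) hi _ _ (fun i h1 h2 => hg3 i h1)]
      ring
    · by_cases hb : K' ≤ N
      · -- N - 1 ≤ K' ≤ N : first segment empty
        have e1 : N < lo := by omega
        have e2 : max lo (N + 1) = lo := by omega
        have e3 : min hi (N + K') = N + K' := by omega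
        have e4 : max lo (N + K' + 1) = N + K' + 1 := by omega
        rw [e2, e3, e4, SInt_zero lo (min hi N) _ (by omega)]
        rw [SInt_split lo (N + K') hi _ (by omega) (by omega)]
        rw [SInt_congr lo (N + K') _ _ (fun i h1 h2 => hg2 i h1 (by omega) (by omega)),
          SInt_congr (N + K' + 1) hi _ _ (fun i h1 h2 => hg3 i h1)]
        ring
      · -- K' > N : only the middle segment
        have e2 : max lo (N + 1) = lo := by omega
        have e3 : min hi (N + K') = hi := by omega
        rw [e2, e3, SInt_zero lo (min hi N) _ (by omega),
          SInt_zero (max lo (N + K' + 1)) hi _ (by omega)]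
        rw [SInt_congr lo hi _ _ (fun i h1 h2 => hg2 i h1 (by omega) (by omega))]
        ring

-- ===== VERDICT (by name: the statement is the Claim_ definition above) =====
theorem count_quadruples_spec : Claim_equal_count_quadruples := by
  intro N K _
  unfold Spec_count_quadruples
  exact count_quadruples_eq N K
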